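-- pv_equiv track=rewrite | github.com/Soluble-tie817/SENT | analysis/differ.py | compute_file_diff
-- ===== SOURCE A (Python) =====
-- def compute_file_diff(
--     old_files: dict[str, str],
--     new_files: dict[str, str],
-- ) -> tuple[list[str], list[str], list[str]]:
--     old_set = set(old_files.keys())
--     new_set = set(new_files.keys())
--     added = sorted(new_set - old_set)
--     removed = sorted(old_set - new_set)
--     modified = sorted(
--         f for f in (old_set & new_set)
--         if old_files[f] != new_files[f]
--     )
--     return added, removed, modified
-- ===== SOURCE B (Python) =====
-- def compute_file_diff(
--     old_files: dict[str, str],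
--     new_files: dict[str, str],
-- ) -> tuple[list[str], list[str], list[str]]:
--     added, modified = [], []
--     for f, content in new_files.items():
--         old = old_files.get(f)
--         if old is None:
--             added.append(f)
--         elif old != content:
--             modified.append(f)
--     removed = [f for f in old_files if f not in new_files]
--     return sorted(added), sorted(removed), sorted(modified)
-- ===== Notes on version B (the rewrite author's own statement) =====
-- stated objective: simpler
-- what changed: Replaces the three set-algebra computations (two set differences and an intersection with repeated lookups) by one pass over new_files classifying each key as added/modified via a single .get(), plus one comprehension over old_files for removed.
import Mathlib
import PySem

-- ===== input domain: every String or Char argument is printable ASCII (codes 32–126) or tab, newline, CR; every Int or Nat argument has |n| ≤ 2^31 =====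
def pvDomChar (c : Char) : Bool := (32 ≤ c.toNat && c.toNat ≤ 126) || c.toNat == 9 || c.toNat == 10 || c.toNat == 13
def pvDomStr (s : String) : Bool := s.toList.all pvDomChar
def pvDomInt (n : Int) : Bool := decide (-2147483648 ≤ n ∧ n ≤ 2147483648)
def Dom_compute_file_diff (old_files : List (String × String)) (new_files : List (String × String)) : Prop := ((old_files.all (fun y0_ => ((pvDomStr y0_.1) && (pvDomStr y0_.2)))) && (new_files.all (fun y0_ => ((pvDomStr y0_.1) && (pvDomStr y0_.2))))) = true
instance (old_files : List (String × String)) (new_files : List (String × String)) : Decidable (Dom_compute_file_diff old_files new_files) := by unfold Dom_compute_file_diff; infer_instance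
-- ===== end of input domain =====

-- B replaces A's set algebra by one classifying pass over new_files plus one membership
-- pass over old_files (objective: simpler); same return value, no mutation either side.

-- ===== PORT A =====
-- old_files[f] / new_files[f] are looked up with Dict.get?; on the intersection both keys
-- are present, so the Option lookup is exact (Python's KeyError is unreachable there).
def compute_file_diff (old_files : List (String × String)) (new_files : List (String × String)) : List String × List String × List String :=
  let old_set := PySem.Set.ofList (PySem.Dict.mk old_files).keys
  let new_set := PySem.Set.ofList (PySem.Dict.mk new_files).keys
  let added := PySem.List.sorted (PySem.Set.diff new_set old_set) (fun x => x) false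
  let removed := PySem.List.sorted (PySem.Set.diff old_set new_set) (fun x => x) false
  let modified := PySem.List.sorted ((PySem.Set.inter old_set new_set).filter
      (fun f => !((PySem.Dict.mk old_files).get? f == (PySem.Dict.mk new_files).get? f)))
      (fun x => x) false
  (added, removed, modified)

-- ===== PORT B =====
-- old_files.get(f) is Dict.get?; 'old is None' is the none branch of the match.
def compute_file_diff_alt (old_files : List (String × String)) (new_files : List (String × String)) : List String × List String × List String :=
  let am := new_files.foldl (fun (acc : List String × List String) fc =>
      match (PySem.Dict.mk old_files).get? fc.1 with
      | none => (acc.1 ++ [fc.1], acc.2)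
      | some old => if old ≠ fc.2 then (acc.1, acc.2 ++ [fc.1]) else acc) ([], [])
  let removed := (PySem.Dict.mk old_files).keys.filter (fun f => !(PySem.Dict.mk new_files).contains f)
  (PySem.List.sorted am.1 (fun x => x) false,
   PySem.List.sorted removed (fun x => x) false,
   PySem.List.sorted am.2 (fun x => x) false)

-- ===== PRECONDITION & SPEC =====
-- Pre_ excludes association lists with duplicate keys: a Python dict cannot contain a
-- duplicate key, so such lists do not encode any input A ever receives.
def Pre_compute_file_diff (old_files : List (String × String)) (new_files : List (String × String)) : Prop :=
  (old_files.map Prod.fst).Nodup ∧ (new_files.map Prod.fst).Nodup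
instance (old_files : List (String × String)) (new_files : List (String × String)) : Decidable (Pre_compute_file_diff old_files new_files) := by unfold Pre_compute_file_diff; infer_instance
def pvWitness_compute_file_diff : (List (String × String)) × (List (String × String)) :=
  ([("a.py", "one"), ("b.py", "two")], [("b.py", "three"), ("c.py", "four")])
def Spec_compute_file_diff (old_files : List (String × String)) (new_files : List (String × String)) (out : List String × List String × List String) : Prop := out = compute_file_diff_alt old_files new_files
instance (old_files : List (String × String)) (new_files : List (String × String)) (out : List String × List String × List String) : Decidable (Spec_compute_file_diff old_files new_files out) := by unfold Spec_compute_file_diff; infer_instance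

-- ===== CLAIM (what is proved, stated in full; the proofs are below) =====
def Claim_equal_compute_file_diff : Prop := ∀ (old_files : List (String × String)) (new_files : List (String × String)), Dom_compute_file_diff old_files new_files → Pre_compute_file_diff old_files new_files → Spec_compute_file_diff old_files new_files (compute_file_diff old_files new_files)

-- ===== LEMMAS AND PROOFS =====

-- closed form of B's classifying fold
theorem pv_fold_closed (o : List (String × String)) :
    ∀ (l : List (String × String)) (a m : List String),
    l.foldl (fun (acc : List String × List String) fc =>
      match (PySem.Dict.mk o).get? fc.1 with
      | none => (acc.1 ++ [fc.1], acc.2)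
      | some old => if old ≠ fc.2 then (acc.1, acc.2 ++ [fc.1]) else acc) (a, m)
    = (a ++ (l.filter (fun fc => ((PySem.Dict.mk o).get? fc.1).isNone)).map Prod.fst,
       m ++ (l.filter (fun fc => match (PySem.Dict.mk o).get? fc.1 with
              | none => false
              | some v => decide (v ≠ fc.2))).map Prod.fst) := by
  intro l
  induction l with
  | nil => intro a m; simp
  | cons fc t ih =>
      intro a m
      simp only [ne_eq, ite_not, decide_not] at ih
      rcases h : (PySem.Dict.mk o).get? fc.1 with _ | v
      · simp [List.foldl_cons, h, ih]
      · by_cases hv : v = fc.2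
        · simp [List.foldl_cons, h, hv, ih]
        · simp [List.foldl_cons, h, hv, ih]

theorem compute_file_diff_spec' (o n : List (String × String))
    (ho : (o.map Prod.fst).Nodup) (hn : (n.map Prod.fst).Nodup) :
    compute_file_diff o n = compute_file_diff_alt o n := by
  unfold compute_file_diff compute_file_diff_alt
  have hkeyso : (PySem.Dict.mk o).keys = o.map Prod.fst := by simp [PySem.Dict.keys_mk]
  have hkeysn : (PySem.Dict.mk n).keys = n.map Prod.fst := by simp [PySem.Dict.keys_mk]
  have hoo : PySem.Set.ofList (o.map Prod.fst) = o.map Prod.fst :=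
    PySem.Set.ofList_eq_self_of_nodup _ ho
  have hnn : PySem.Set.ofList (n.map Prod.fst) = n.map Prod.fst :=
    PySem.Set.ofList_eq_self_of_nodup _ hn
  rw [pv_fold_closed, hkeyso, hkeysn]
  simp only [List.nil_append]
  have hgo : ∀ x, (PySem.Dict.mk o).get? x = none ↔ x ∉ o.map Prod.fst := by
    intro x
    rw [PySem.Dict.get?_eq_none_iff_not_mem_keys, hkeyso]
  have hgn : ∀ x, (PySem.Dict.mk n).get? x = none ↔ x ∉ n.map Prod.fst := by
    intro x
    rw [PySem.Dict.get?_eq_none_iff_not_mem_keys, hkeysn]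
  refine congrArg₂ Prod.mk ?_ (congrArg₂ Prod.mk ?_ ?_)
  · -- added
    apply PySem.List.sorted_eq_sorted_of_perm _ _ _ (fun a b h => h)
    rw [hoo, hnn, List.perm_ext_iff_of_nodup (PySem.Set.nodup_diff _ _ hn)
      (hn.sublist (List.Sublist.map Prod.fst List.filter_sublist))]
    intro x
    simp only [PySem.Set.mem_diff, List.mem_map, List.mem_filter,
      Option.isNone_iff_eq_none]
    constructor
    · rintro ⟨⟨fc, hfc, rfl⟩, hnx⟩
      exact ⟨fc, ⟨hfc, (hgo fc.1).2 (by simpa using hnx)⟩, rfl⟩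
    · rintro ⟨fc, ⟨hfc, hp⟩, rfl⟩
      exact ⟨⟨fc, hfc, rfl⟩, by simpa using (hgo fc.1).1 hp⟩
  · -- removed
    apply PySem.List.sorted_eq_sorted_of_perm _ _ _ (fun a b h => h)
    rw [hoo, hnn, List.perm_ext_iff_of_nodup (PySem.Set.nodup_diff _ _ ho) (ho.filter _)]
    intro x
    simp only [PySem.Set.mem_diff, List.mem_filter, Bool.not_eq_true',
      PySem.Dict.contains_eq_decide_mem_keys, hkeysn, decide_eq_false_iff_not]
  · -- modified
    apply PySem.List.sorted_eq_sorted_of_perm _ _ _ (fun a b h => h)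
    rw [hoo, hnn, List.perm_ext_iff_of_nodup ((PySem.Set.nodup_inter _ _ ho).filter _)
      (hn.sublist (List.Sublist.map Prod.fst List.filter_sublist))]
    intro x
    have hitems : ∀ fc : String × String, fc ∈ n →
        (PySem.Dict.mk n).get? fc.1 = some fc.2 := by
      intro fc hfc
      exact (PySem.Dict.get?_eq_some_iff_mem_items _ _ _
        (by rw [hkeysn]; exact hn)).2 (by simpa using hfc)
    simp only [List.mem_filter, PySem.Set.mem_inter, List.mem_map,
      Bool.not_eq_true', beq_eq_false_iff_ne, ne_eq]
    constructor
    · rintro ⟨⟨hxo, ⟨fc, hfc, rfl⟩⟩, hne⟩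
      have hc := hitems fc hfc
      rcases h : (PySem.Dict.mk o).get? fc.1 with _ | v
      · exact absurd ((hgo fc.1).1 h) (by simpa using hxo)
      · refine ⟨fc, ⟨hfc, ?_⟩, rfl⟩
        have hv : v ≠ fc.2 := by
          intro hvfc
          exact hne (by rw [hc, h, hvfc])
        rw [h]
        simp [hv]
    · rintro ⟨fc, ⟨hfc, hp⟩, rfl⟩
      have hc := hitems fc hfc
      rcases h : (PySem.Dict.mk o).get? fc.1 with _ | v
      · rw [h] at hp
        simp at hp
      · rw [h] at hp
        simp at hp
        have hmo : fc.1 ∈ List.map Prod.fst o := by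
          by_contra hxo
          rw [(hgo fc.1).2 hxo] at h
          cases h
        refine ⟨⟨by simpa using hmo, ⟨fc, hfc, rfl⟩⟩, ?_⟩
        rw [hc]
        simp [hp]


-- ===== VERDICT (by name: the statement is the Claim_ definition above) =====
theorem compute_file_diff_spec : Claim_equal_compute_file_diff := by
  intro o n _ hpre
  exact (compute_file_diff_spec' o n hpre.1 hpre.2).symm ▸ rfl
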